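-- pv_equiv track=rewrite | github.com/andesec/dylen-engine | scripts/db_check_drift.py | _filter_diffs
-- ===== SOURCE A (Python) =====
-- from typing import Any
--
-- def _filter_diffs(diffs: list[Any], allowlist: list[str]) -> list[Any]:
--   """Remove diffs that match allowlist tokens to keep drift checks explicit."""
--   # Skip filtering when no allowlist tokens are configured.
--   if not allowlist:
--     return diffs
--
--   # Keep only diffs that do not match any allowlist token.
--   filtered: list[Any] = []
--   for diff in diffs:
--     diff_text = str(diff)
--     if any(token in diff_text for token in allowlist):
--       continue
--
--     filtered.append(diff)
--
--   return filtered
-- ===== SOURCE B (Python) =====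
-- from typing import Any
--
-- def _filter_diffs(diffs: list[Any], allowlist: list[str]) -> list[Any]:
--   """Token-outer sequential filtering: one filter pass per allowlist token."""
--   kept = diffs
--   for token in allowlist:
--     kept = [d for d in kept if token not in str(d)]
--   return kept
-- ===== Notes on version B (the rewrite author's own statement) =====
-- stated objective: alternative
-- what changed: Inverted the loop nesting: instead of testing every token inside a per-diff loop with an accumulator, B folds over the allowlist applying one order-preserving filter pass per token (sequential filtering commutes with the any-token disjunction).
import Mathlib
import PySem

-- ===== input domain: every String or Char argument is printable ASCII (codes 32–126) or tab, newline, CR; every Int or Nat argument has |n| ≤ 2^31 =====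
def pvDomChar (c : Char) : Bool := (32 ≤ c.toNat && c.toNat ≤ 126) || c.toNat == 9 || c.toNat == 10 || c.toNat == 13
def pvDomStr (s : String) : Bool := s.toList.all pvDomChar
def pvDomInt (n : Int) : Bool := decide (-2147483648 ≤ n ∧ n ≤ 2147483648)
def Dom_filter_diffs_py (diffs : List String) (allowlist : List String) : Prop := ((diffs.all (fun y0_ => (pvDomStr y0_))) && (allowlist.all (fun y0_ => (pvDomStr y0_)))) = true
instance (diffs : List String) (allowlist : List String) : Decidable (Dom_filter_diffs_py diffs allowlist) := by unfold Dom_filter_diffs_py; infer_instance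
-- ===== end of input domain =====

-- B replaces A's per-diff scan over all tokens by a token-outer fold of order-preserving
-- filter passes (alternative decomposition; same asymptotic cost, no speed claim).

-- ===== PORT A =====
-- A: diff-outer loop; for each diff, keep it unless any allowlist token occurs in it.
def filter_diffs_py (diffs : List String) (allowlist : List String) : List String :=
  if allowlist = [] then diffs
  else
    diffs.foldl (fun filtered diff =>
      if allowlist.any (fun token => PySem.Str.isIn token diff) then filtered
      else filtered ++ [diff]) []

-- ===== PORT B =====
-- B: token-outer sequential filtering — one order-preserving filter pass per token.
def filter_diffs_py_alt (diffs : List String) (allowlist : List String) : List String :=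
  allowlist.foldl (fun kept token => kept.filter (fun d => !(PySem.Str.isIn token d))) diffs

-- ===== PRECONDITION & SPEC =====
def Spec_filter_diffs_py (diffs : List String) (allowlist : List String) (out : List String) : Prop := out = filter_diffs_py_alt diffs allowlist
instance (diffs : List String) (allowlist : List String) (out : List String) : Decidable (Spec_filter_diffs_py diffs allowlist out) := by unfold Spec_filter_diffs_py; infer_instance

-- ===== CLAIM (what is proved, stated in full; the proofs are below) =====
def Claim_equal_filter_diffs_py : Prop := ∀ (diffs : List String) (allowlist : List String), Dom_filter_diffs_py diffs allowlist → Spec_filter_diffs_py diffs allowlist (filter_diffs_py diffs allowlist)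

-- ===== LEMMAS AND PROOFS =====

-- B's sequential token-by-token filtering equals one filter by "no token occurs".
theorem foldl_filter_eq_filter_any (allowlist : List String) (diffs : List String) :
    allowlist.foldl (fun kept token => kept.filter (fun d => !(PySem.Str.isIn token d))) diffs
      = diffs.filter (fun d => !allowlist.any (fun token => PySem.Str.isIn token d)) := by
  induction allowlist generalizing diffs with
  | nil => simp
  | cons t ts ih =>
      simp only [List.foldl_cons, ih, List.filter_filter, List.any_cons]
      exact List.filter_congr (fun d _ => by cases PySem.Str.isIn t d <;> simp)

-- A's accumulator loop is a filter by the same predicate.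
theorem a_foldl_eq_filter (allowlist : List String) (diffs : List String) :
    diffs.foldl (fun filtered diff =>
      if allowlist.any (fun token => PySem.Str.isIn token diff) then filtered
      else filtered ++ [diff]) []
      = diffs.filter (fun d => !allowlist.any (fun token => PySem.Str.isIn token d)) := by
  have h : ∀ (acc : List String),
      diffs.foldl (fun filtered diff =>
        if allowlist.any (fun token => PySem.Str.isIn token diff) then filtered
        else filtered ++ [diff]) acc
        = acc ++ diffs.filter (fun d => !allowlist.any (fun token => PySem.Str.isIn token d)) := by
    induction diffs with
    | nil => simp
    | cons d ds ih =>
        intro acc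
        rw [List.foldl_cons]
        cases hd : allowlist.any (fun token => PySem.Str.isIn token d)
        · rw [if_neg Bool.false_ne_true, ih, List.filter_cons, hd]
          simp
        · rw [if_pos rfl, ih, List.filter_cons, hd]
          simp
  simpa using h []

-- ===== VERDICT (by name: the statement is the Claim_ definition above) =====
theorem filter_diffs_py_spec : Claim_equal_filter_diffs_py := by
  intro diffs allowlist _
  unfold Spec_filter_diffs_py filter_diffs_py filter_diffs_py_alt
  rw [foldl_filter_eq_filter_any]
  by_cases h : allowlist = []
  · simp [h]
  · rw [if_neg h, a_foldl_eq_filter]
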